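-- pv_equiv track=rewrite | github.com/baldersheim/documentation | test/test.py | parse_cmds
-- ===== SOURCE A (Python) =====
-- def parse_cmd(cmd, attrs):
--     cmd = cmd.strip()
--     if cmd.startswith("#"):
--         return None
--     if cmd.startswith("$"):
--         cmd = cmd[1:]
--     cmd = cmd.strip()
--     if len(cmd) == 0:
--         return None
--
--     if "data-test-wait-for" in attrs:
--         return { "$" : cmd, "type":"wait", "wait-for":attrs["data-test-wait-for"] }
--     if "data-test-assert-contains" in attrs:
--         return { "$" : cmd, "type":"assert", "contains":attrs["data-test-assert-contains"] }
--     return { "$" : cmd, "type":"default" }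
--
-- def parse_cmds(pre, attrs):
--     cmds = []
--     line_continuation = ""
--     line_continuation_delimiter = "\\"
--     for line in pre.split("\n"):
--         cmd = "{0} {1}".format(line_continuation, line.strip())
--         if cmd.endswith(line_continuation_delimiter):
--             line_continuation = cmd[:-len(line_continuation_delimiter)]
--         else:
--             cmd = parse_cmd(cmd, attrs)
--             if cmd != None:
--                 cmds.append(cmd)
--             line_continuation = ""
--     return cmds
-- ===== SOURCE B (Python) =====
-- def _parse_one(cmd, attrs):
--     s = cmd.strip()
--     if s.startswith("#"):
--         return None
--     if s.startswith("$"):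
--         s = s[1:].strip()
--     if not s:
--         return None
--     for key, typ, field in (("data-test-wait-for", "wait", "wait-for"),
--                             ("data-test-assert-contains", "assert", "contains")):
--         if key in attrs:
--             return {"$": s, "type": typ, field: attrs[key]}
--     return {"$": s, "type": "default"}
--
-- def parse_cmds(pre, attrs):
--     # Build the logical command texts BACK-TO-FRONT: walk the physical lines in
--     # reverse; a terminator line opens a new command, a continuation line glues
--     # itself onto the nearest command opened so far (none yet = a trailing
--     # unterminated continuation, which is dropped).  A second pass parses them.
--     raws = []                     # reversed while building: raws[-1] = earliest command
--     for line in reversed(pre.split("\n")):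
--         s = line.strip()
--         if s.endswith("\\"):
--             if raws:
--                 raws[-1] = s[:-1] + " " + raws[-1]
--         else:
--             raws.append(s)
--     raws.reverse()
--     out = []
--     for raw in raws:
--         p = _parse_one(raw, attrs)
--         if p is not None:
--             out.append(p)
--     return out
-- ===== Notes on version B (the rewrite author's own statement) =====
-- stated objective: alternative
-- what changed: B builds the logical command texts back-to-front: it walks the physical lines in REVERSE, where a terminator line opens a new command and a continuation line glues itself onto the nearest command opened so far (in-place edit of the list's last entry), so the forward continuation-accumulator state machine disappears; a separate second pass then parses the texts with a table-driven rule scan instead of A's if-chain.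
import Mathlib
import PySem

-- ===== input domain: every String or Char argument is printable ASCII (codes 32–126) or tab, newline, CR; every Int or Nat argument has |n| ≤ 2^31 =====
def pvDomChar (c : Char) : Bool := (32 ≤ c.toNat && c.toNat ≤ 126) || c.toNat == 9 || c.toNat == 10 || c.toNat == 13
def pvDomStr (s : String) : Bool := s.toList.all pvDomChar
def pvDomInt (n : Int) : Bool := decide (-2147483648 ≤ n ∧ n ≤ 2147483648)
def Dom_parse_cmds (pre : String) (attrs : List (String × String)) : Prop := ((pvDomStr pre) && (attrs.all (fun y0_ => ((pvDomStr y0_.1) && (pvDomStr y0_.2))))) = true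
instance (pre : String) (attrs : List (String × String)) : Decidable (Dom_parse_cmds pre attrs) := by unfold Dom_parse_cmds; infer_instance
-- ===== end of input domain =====

-- B builds the logical command texts back-to-front (reverse walk over the lines, gluing a
-- continuation onto the command opened after it) and parses them in a separate second pass;
-- A runs a forward state machine with a continuation accumulator. Same return value.

-- ===== PORT A =====
-- parse_cmd(cmd, attrs): a returned dict is a List (String × String) in insertion order;
-- '"k" in attrs' + 'attrs["k"]' on the dict parameter is first-match lookup on the association list.
def pvParseCmdA (cmd : List Char) (attrs : List (String × String)) : Option (List (String × String)) :=
  let cmd := PySem.Chars.strip cmd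
  if PySem.Chars.startswith cmd ['#'] then none
  else
    let cmd := if PySem.Chars.startswith cmd ['$'] then PySem.Chars.slice cmd (some 1) none else cmd
    let cmd := PySem.Chars.strip cmd
    if cmd.length = 0 then none
    else
      match List.lookup "data-test-wait-for" attrs with
      | some w => some [("$", String.ofList cmd), ("type", "wait"), ("wait-for", w)]
      | none =>
        match List.lookup "data-test-assert-contains" attrs with
        | some w => some [("$", String.ofList cmd), ("type", "assert"), ("contains", w)]
        | none => some [("$", String.ofList cmd), ("type", "default")]

-- one iteration of A's loop; state = (cmds, line_continuation)
def pvStepA (attrs : List (String × String)) (st : List (List (String × String)) × List Char)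
    (line : List Char) : List (List (String × String)) × List Char :=
  let cmd := st.2 ++ [' '] ++ PySem.Chars.strip line            -- "{0} {1}".format(...)
  if PySem.Chars.endswith cmd ['\\'] then
    (st.1, PySem.Chars.slice cmd none (some (-1)))              -- cmd[:-len("\\")]
  else
    match pvParseCmdA cmd attrs with
    | some c => (st.1 ++ [c], [])
    | none => (st.1, [])

def parse_cmds (pre : String) (attrs : List (String × String)) : List (List (String × String)) :=
  (((PySem.Chars.split? pre.toList ['\n']).getD []).foldl (pvStepA attrs) ([], [])).1

-- ===== PORT B =====
-- the rule table of Source B's _parse_one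
def pvRules : List (String × String × String) :=
  [("data-test-wait-for", "wait", "wait-for"), ("data-test-assert-contains", "assert", "contains")]

def pvParseOneB (cmd : List Char) (attrs : List (String × String)) : Option (List (String × String)) :=
  let s := PySem.Chars.strip cmd
  if PySem.Chars.startswith s ['#'] then none
  else
    let s := if PySem.Chars.startswith s ['$'] then PySem.Chars.strip (PySem.Chars.slice s (some 1) none) else s
    if s.isEmpty then none
    else
      -- 'for key, typ, field in pvRules: if key in attrs: return …' as an early-return scan
      match pvRules.findSome? (fun r => (List.lookup r.1 attrs).map (fun v => (r.2.1, r.2.2, v))) with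
      | some (typ, field, v) => some [("$", String.ofList s), ("type", typ), (field, v)]
      | none => some [("$", String.ofList s), ("type", "default")]

-- one reverse-walk step of Source B: raws[-1] is the earliest command opened so far
def pvBStep (raws : List (List Char)) (line : List Char) : List (List Char) :=
  let s := PySem.Chars.strip line
  if PySem.Chars.endswith s ['\\'] then
    match raws.getLast? with                                    -- 'if raws:'
    | some r => raws.dropLast ++ [PySem.Chars.slice s none (some (-1)) ++ ' ' :: r]
                                                                -- raws[-1] = s[:-1] + " " + raws[-1]
    | none => raws
  else raws ++ [s]                                              -- raws.append(s)

def parse_cmds_alt (pre : String) (attrs : List (String × String)) : List (List (String × String)) :=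
  let raws := ((((PySem.Chars.split? pre.toList ['\n']).getD []).reverse).foldl pvBStep []).reverse
  raws.foldl (fun out raw =>
    match pvParseOneB raw attrs with
    | some p => out ++ [p]
    | none => out) []

-- ===== PRECONDITION & SPEC =====
def Spec_parse_cmds (pre : String) (attrs : List (String × String)) (out : List (List (String × String))) : Prop := out = parse_cmds_alt pre attrs
instance (pre : String) (attrs : List (String × String)) (out : List (List (String × String))) : Decidable (Spec_parse_cmds pre attrs out) := by unfold Spec_parse_cmds; infer_instance

-- ===== CLAIM (what is proved, stated in full; the proofs are below) =====
def Claim_equal_parse_cmds : Prop := ∀ (pre : String) (attrs : List (String × String)), Dom_parse_cmds pre attrs → Spec_parse_cmds pre attrs (parse_cmds pre attrs)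

-- ===== LEMMAS AND PROOFS =====

-- the logical command texts of a line list, characterised head-first:
-- a continuation line glues onto the first command of the rest (or is dropped if there is none)
def pvRawsOf : List (List Char) → List (List Char)
  | [] => []
  | l :: t =>
    let s := PySem.Chars.strip l
    if PySem.Chars.endswith s ['\\'] then
      match pvRawsOf t with
      | [] => []
      | r :: rs => (s.dropLast ++ ' ' :: r) :: rs
    else s :: pvRawsOf t

-- A's continuation accumulator, and the same parts glued in front of a command text
def pvGlue (buf : List (List Char)) : List Char := (buf.map (fun p => ' ' :: p)).flatten
def pvPrep (buf : List (List Char)) (r : List Char) : List Char :=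
  (buf.map (fun p => p ++ [' '])).flatten ++ r

theorem dw_idem {α} (p : α → Bool) (l : List α) :
    List.dropWhile p (List.dropWhile p l) = List.dropWhile p l := by
  induction l with
  | nil => simp
  | cons a t ih => by_cases h : p a <;> simp [h, ih]

theorem strip_idem (s : List Char) : PySem.Chars.strip (PySem.Chars.strip s) = PySem.Chars.strip s := by
  simp only [PySem.Chars.strip, PySem.Chars.lstrip, PySem.Chars.rstrip]
  set p := PySem.Chars.isspace
  set t := List.dropWhile p s with ht
  set r := (List.dropWhile p t.reverse).reverse with hr
  have h1 : List.dropWhile p r = r := by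
    rcases hR : r with _ | ⟨a, rs⟩
    · simp
    · have hpre : r <+: t := by
        have := List.reverse_prefix.mpr (List.dropWhile_suffix (l := t.reverse) p)
        simpa [← hr] using this
      obtain ⟨u, hu⟩ := hpre
      rw [hR] at hu
      have htt : List.dropWhile p t = t := dw_idem p s
      rw [List.dropWhile_eq_self_iff] at htt
      have hpa : p a = false := by
        have h0 : 0 < t.length := by rw [← hu]; simp
        have h2 := htt h0
        simp [← hu] at h2
        exact h2
      simp [hpa]
  rw [h1, hr, List.reverse_reverse, dw_idem]

theorem strip_cons_space (s : List Char) : PySem.Chars.strip (' ' :: s) = PySem.Chars.strip s := by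
  simp [PySem.Chars.strip, PySem.Chars.lstrip, PySem.Chars.isspace]

-- the two parse helpers agree whenever their inputs have the same strip
theorem parse_agree (c c' : List Char) (attrs : List (String × String))
    (h : PySem.Chars.strip c = PySem.Chars.strip c') :
    pvParseCmdA c attrs = pvParseOneB c' attrs := by
  unfold pvParseCmdA pvParseOneB
  rw [← h]
  by_cases h1 : PySem.Chars.startswith (PySem.Chars.strip c) ['#']
  · simp [h1]
  · simp only [h1, if_false, Bool.false_eq_true]
    by_cases h2 : PySem.Chars.startswith (PySem.Chars.strip c) ['$'] <;>
      simp only [h2, if_true, if_false, Bool.false_eq_true, strip_idem, List.isEmpty_iff_length_eq_zero] <;>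
      split_ifs with h3
    · rfl
    · rcases hw : List.lookup "data-test-wait-for" attrs with _ | w <;>
        rcases ha : List.lookup "data-test-assert-contains" attrs with _ | a <;>
          simp [pvRules, List.findSome?, hw, ha]
    · rfl
    · rcases hw : List.lookup "data-test-wait-for" attrs with _ | w <;>
        rcases ha : List.lookup "data-test-assert-contains" attrs with _ | a <;>
          simp [pvRules, List.findSome?, hw, ha]

theorem modifyHead_prep_nil (l : List (List Char)) : l.modifyHead (pvPrep []) = l := by
  cases l <;> simp [pvPrep]

theorem glue_prep (buf : List (List Char)) (s : List Char) :
    pvGlue buf ++ [' '] ++ s = ' ' :: pvPrep buf s := by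
  induction buf with
  | nil => simp [pvGlue, pvPrep]
  | cons p bs ih =>
    simp only [pvGlue, pvPrep, List.map_cons, List.flatten_cons, List.cons_append,
      List.append_assoc] at *
    simpa using ih

theorem prep_snoc (buf : List (List Char)) (p r : List Char) :
    pvPrep (buf ++ [p]) r = pvPrep buf (p ++ ' ' :: r) := by
  simp [pvPrep]

theorem suff_singleton_concat {α} (l : List α) (c a : α) : ([a] <:+ (l ++ [c])) ↔ c = a := by
  constructor
  · rintro ⟨u, hu⟩
    have := congrArg List.getLast? hu
    simpa using this.symm
  · rintro rfl; exact ⟨l, rfl⟩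

theorem endswith_glue (xs s : List Char) :
    PySem.Chars.endswith (xs ++ [' '] ++ s) ['\\'] = PySem.Chars.endswith s ['\\'] := by
  rw [Bool.eq_iff_iff]
  simp only [PySem.Chars.endswith_iff]
  rcases s.eq_nil_or_concat with h | ⟨t, c, h⟩ <;> subst h
  · rw [List.append_nil, suff_singleton_concat]
    simp
  · simp only [List.concat_eq_append]
    rw [show xs ++ [' '] ++ (t ++ [c]) = (xs ++ [' '] ++ t) ++ [c] by simp,
        suff_singleton_concat, suff_singleton_concat]

-- B's reverse fold computes pvRawsOf, reversed
theorem b_raws (lines : List (List Char)) :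
    lines.reverse.foldl pvBStep [] = (pvRawsOf lines).reverse := by
  rw [List.foldl_reverse]
  induction lines with
  | nil => simp [pvRawsOf]
  | cons l t ih =>
    rw [List.foldr_cons, ih]
    simp only [pvBStep, pvRawsOf, PySem.Chars.slice_eq_listSlice, PySem.List.slice_to_neg_one]
    split_ifs with h
    · rcases ht : pvRawsOf t with _ | ⟨r, rs⟩ <;>
        simp [List.getLast?_reverse]
    · simp

-- one parse-pass step appended: the second pass is a flatMap over option-to-list
theorem parse_pass (attrs : List (String × String)) (raws : List (List Char))
    (acc : List (List (String × String))) :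
    raws.foldl (fun out raw =>
      match pvParseOneB raw attrs with
      | some p => out ++ [p]
      | none => out) acc
    = acc ++ raws.flatMap (fun raw => (pvParseOneB raw attrs).toList) := by
  have : (fun (out : List (List (String × String))) raw =>
      match pvParseOneB raw attrs with
      | some p => out ++ [p]
      | none => out)
      = fun out raw => out ++ (pvParseOneB raw attrs).toList := by
    funext out raw
    rcases pvParseOneB raw attrs with _ | p <;> simp
  rw [this, PySem.List.foldl_append_eq_flatMap]

-- main loop invariant: A's fold from (cmds, glued buffer) = parse results of the
-- buffer-prefixed logical commands of the remaining lines
theorem main_inv (lines : List (List Char)) (attrs : List (String × String))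
    (cmds : List (List (String × String))) (buf : List (List Char)) :
    (lines.foldl (pvStepA attrs) (cmds, pvGlue buf)).1
      = cmds ++ ((pvRawsOf lines).modifyHead (pvPrep buf)).flatMap
          (fun raw => (pvParseOneB raw attrs).toList) := by
  induction lines generalizing cmds buf with
  | nil => simp [pvRawsOf]
  | cons line rest ih =>
    simp only [List.foldl_cons, pvStepA, pvRawsOf, PySem.Chars.slice_eq_listSlice,
      PySem.List.slice_to_neg_one, endswith_glue]
    split_ifs with h
    · -- continuation line
      have hne : PySem.Chars.strip line ≠ [] := by
        intro hnil
        rw [hnil] at h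
        simp [PySem.Chars.endswith] at h
      have hdl : (pvGlue buf ++ [' '] ++ PySem.Chars.strip line).dropLast
          = pvGlue (buf ++ [(PySem.Chars.strip line).dropLast]) := by
        rw [List.dropLast_append_of_ne_nil hne]
        simp [pvGlue]
      rw [hdl, ih cmds _]
      rcases ht : pvRawsOf rest with _ | ⟨r, rs⟩
      · simp
      · simp [prep_snoc]
    · -- command complete
      have hstrip : PySem.Chars.strip (pvGlue buf ++ [' '] ++ PySem.Chars.strip line)
          = PySem.Chars.strip (pvPrep buf (PySem.Chars.strip line)) := by
        rw [glue_prep, strip_cons_space]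
      rw [parse_agree _ _ attrs hstrip]
      have h0 := ih (cmds ++ (pvParseOneB (pvPrep buf (PySem.Chars.strip line)) attrs).toList) []
      rw [modifyHead_prep_nil] at h0
      rcases hp : pvParseOneB (pvPrep buf (PySem.Chars.strip line)) attrs with _ | p <;>
        rw [hp] at h0 <;> simpa [hp, pvGlue] using h0

-- ===== VERDICT (by name: the statement is the Claim_ definition above) =====
theorem parse_cmds_spec : Claim_equal_parse_cmds := by
  intro pre attrs _
  unfold Spec_parse_cmds parse_cmds parse_cmds_alt
  rw [b_raws, List.reverse_reverse, parse_pass]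
  have := main_inv ((PySem.Chars.split? pre.toList ['\n']).getD []) attrs [] []
  rw [modifyHead_prep_nil] at this
  simpa [pvGlue] using this
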